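-- pv_equiv track=rewrite | github.com/ZadeAl-Shinnawi/JadeCocoon2FileRE | jadec2_model.py | tile_palette
-- ===== SOURCE A (Python) =====
-- def tile_palette(palette, tile_x, tile_y):
-- 	ntx = 16 // tile_x
-- 	nty = 16 // tile_y
-- 	i = 0
-- 	new_palette = [(0,0,0,0) for j in range(256)]
--
-- 	for ty in range(nty):
-- 		for tx in range(ntx):
-- 			for y in range(tile_y):
-- 				for x in range(tile_x):
-- 					new_palette[(ty * tile_y + y) * 16 + (tx * tile_x + x)] = palette[i]
-- 					i += 1
-- 	return new_palette
-- ===== SOURCE B (Python) =====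
-- def tile_palette(palette, tile_x, tile_y):
-- 	ntx = 16 // tile_x
-- 	nty = 16 // tile_y
-- 	new_palette = [(0, 0, 0, 0)] * 256
-- 	if tile_x > 0 and tile_y > 0:
-- 		block = tile_x * tile_y
-- 		for i in range(ntx * nty * block):
-- 			x = i % tile_x
-- 			y = i // tile_x % tile_y
-- 			tx = i // block % ntx
-- 			ty = i // (block * ntx)
-- 			new_palette[(ty * tile_y + y) * 16 + (tx * tile_x + x)] = palette[i]
-- 	return new_palette
-- ===== Notes on version B (the rewrite author's own statement) =====
-- stated objective: alternative
-- what changed: Replaces A's four nested tile-placement loops with a running counter by a single flat loop over the palette indices that recovers the four tile coordinates from the index by div/mod arithmetic.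
import Mathlib
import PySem

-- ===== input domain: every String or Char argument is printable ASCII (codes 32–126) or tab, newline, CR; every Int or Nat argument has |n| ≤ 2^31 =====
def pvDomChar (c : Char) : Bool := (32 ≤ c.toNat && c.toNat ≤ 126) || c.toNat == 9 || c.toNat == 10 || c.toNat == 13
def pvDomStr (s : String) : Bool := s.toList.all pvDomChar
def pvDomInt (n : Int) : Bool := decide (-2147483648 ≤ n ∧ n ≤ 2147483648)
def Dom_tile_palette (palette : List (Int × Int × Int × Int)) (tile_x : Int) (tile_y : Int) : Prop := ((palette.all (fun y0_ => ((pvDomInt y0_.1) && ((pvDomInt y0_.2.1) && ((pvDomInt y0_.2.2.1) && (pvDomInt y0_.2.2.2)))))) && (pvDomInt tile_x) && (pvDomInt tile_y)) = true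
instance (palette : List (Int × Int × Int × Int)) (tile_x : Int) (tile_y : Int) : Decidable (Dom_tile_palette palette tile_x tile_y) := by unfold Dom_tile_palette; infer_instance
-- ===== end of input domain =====

-- B replaces A's four nested placement loops by a single flat loop over the palette indices,
-- recovering the four tile coordinates from the index by div/mod arithmetic (objective: alternative decomposition, same cost).

-- ===== PORT A =====
-- literal transliteration of A; palette[i] is pyGet? (none = IndexError, excluded by Pre_; .getD supplies a default never used under Pre_)
def tile_palette (palette : List (Int × Int × Int × Int)) (tile_x : Int) (tile_y : Int) : List (Int × Int × Int × Int) :=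
  let ntx := PySem.Int.floordiv 16 tile_x
  let nty := PySem.Int.floordiv 16 tile_y
  let new_palette := (PySem.List.pyRange 0 256 1).map (fun _ => ((0:Int), (0:Int), (0:Int), (0:Int)))
  let st := (PySem.List.pyRange 0 nty 1).foldl (fun st ty =>
    (PySem.List.pyRange 0 ntx 1).foldl (fun st tx =>
      (PySem.List.pyRange 0 tile_y 1).foldl (fun st y =>
        (PySem.List.pyRange 0 tile_x 1).foldl (fun st x =>
          (st.1 + 1,
           PySem.List.pySetD st.2 ((ty * tile_y + y) * 16 + (tx * tile_x + x))
             ((PySem.List.pyGet? palette st.1).getD (0, 0, 0, 0)))) st) st) st)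
    ((0:Int), new_palette)
  st.2

-- ===== PORT B =====
def tile_palette_alt (palette : List (Int × Int × Int × Int)) (tile_x : Int) (tile_y : Int) : List (Int × Int × Int × Int) :=
  let ntx := PySem.Int.floordiv 16 tile_x
  let nty := PySem.Int.floordiv 16 tile_y
  let new_palette := List.replicate 256 ((0:Int), (0:Int), (0:Int), (0:Int))
  if 0 < tile_x ∧ 0 < tile_y then
    let block := tile_x * tile_y
    (PySem.List.pyRange 0 (ntx * nty * block) 1).foldl (fun np i =>
      let x := PySem.Int.mod i tile_x
      let y := PySem.Int.mod (PySem.Int.floordiv i tile_x) tile_y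
      let tx := PySem.Int.mod (PySem.Int.floordiv i block) ntx
      let ty := PySem.Int.floordiv i (block * ntx)
      PySem.List.pySetD np ((ty * tile_y + y) * 16 + (tx * tile_x + x))
        ((PySem.List.pyGet? palette i).getD (0, 0, 0, 0))) new_palette
  else new_palette

-- ===== PRECONDITION & SPEC =====
-- Pre_ excludes exactly the inputs where Python A raises: tile_x = 0 or tile_y = 0 (ZeroDivisionError),
-- and, for positive tile sizes, palettes shorter than the number of placed entries (IndexError on palette[i]).
def Pre_tile_palette (palette : List (Int × Int × Int × Int)) (tile_x : Int) (tile_y : Int) : Prop :=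
  tile_x ≠ 0 ∧ tile_y ≠ 0 ∧
    (0 < tile_x → 0 < tile_y →
      PySem.Int.floordiv 16 tile_x * PySem.Int.floordiv 16 tile_y * tile_x * tile_y ≤ (palette.length : Int))
instance (palette : List (Int × Int × Int × Int)) (tile_x : Int) (tile_y : Int) : Decidable (Pre_tile_palette palette tile_x tile_y) := by unfold Pre_tile_palette; infer_instance

def pvWitness_tile_palette : (List (Int × Int × Int × Int)) × Int × Int :=
  (List.replicate 81 ((1:Int), (2:Int), (3:Int), (4:Int)), 9, 9)

def Spec_tile_palette (palette : List (Int × Int × Int × Int)) (tile_x : Int) (tile_y : Int) (out : List (Int × Int × Int × Int)) : Prop := out = tile_palette_alt palette tile_x tile_y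
instance (palette : List (Int × Int × Int × Int)) (tile_x : Int) (tile_y : Int) (out : List (Int × Int × Int × Int)) : Decidable (Spec_tile_palette palette tile_x tile_y out) := by unfold Spec_tile_palette; infer_instance

-- ===== CLAIM (what is proved, stated in full; the proofs are below) =====
def Claim_equal_tile_palette : Prop := ∀ (palette : List (Int × Int × Int × Int)) (tile_x : Int) (tile_y : Int), Dom_tile_palette palette tile_x tile_y → Pre_tile_palette palette tile_x tile_y → Spec_tile_palette palette tile_x tile_y (tile_palette palette tile_x tile_y)

-- ===== LEMMAS AND PROOFS =====

-- the fresh 256-entry palette is the same list on both sides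
lemma initA_eq : (PySem.List.pyRange 0 256 1).map (fun _ => ((0:Int), (0:Int), (0:Int), (0:Int)))
    = List.replicate 256 ((0:Int), (0:Int), (0:Int), (0:Int)) := by
  rw [List.map_const', PySem.List.length_pyRange_one]
  norm_num
  decide

-- for a negative divisor, 16 // b is negative (so the corresponding range is empty)
lemma floordiv16_neg {b : Int} (hb : b < 0) : PySem.Int.floordiv 16 b < 0 := by
  by_contra h
  rw [not_lt] at h
  have hmul := PySem.Int.floordiv_mul_add_mod 16 b
  have hbnd := PySem.Int.mod_neg_bounds (a := 16) hb
  nlinarith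

-- range(0, n) is empty for n ≤ 0
lemma pyRange_nonpos {n : Int} (hn : n ≤ 0) : PySem.List.pyRange 0 n 1 = [] := by
  rw [PySem.List.pyRange_one]
  have : (n - 0).toNat = 0 := by omega
  rw [this]
  rfl

-- one multiplicative level: a range of length m*n, read through divmod, is the nested double loop
lemma range_mul_map {α : Type} (m n : Nat) (g : Nat → Nat → α) :
    (List.range (m * n)).map (fun k => g (k / n) (k % n))
      = (List.range m).flatMap (fun q => (List.range n).map (g q)) := by
  induction m with
  | zero => simp
  | succ m ih =>
    rw [Nat.succ_mul, List.range_add, List.map_append, ih, List.range_succ, List.flatMap_append]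
    congr 1
    simp only [List.flatMap_cons, List.flatMap_nil, List.append_nil, List.map_map]
    apply List.map_congr_left
    intro r hr
    have hrn : r < n := List.mem_range.mp hr
    have h0 : 0 < n := Nat.lt_of_le_of_lt (Nat.zero_le r) hrn
    simp only [Function.comp_apply]
    rw [Nat.mul_comm m n]
    congr 1
    · rw [Nat.mul_add_div h0, Nat.div_eq_of_lt hrn, Nat.add_zero]
    · rw [Nat.mul_add_mod, Nat.mod_eq_of_lt hrn]

-- (k % X) / a % b = k / a % b when a*b divides X
lemma div_mod_of_mod (k X a b : Nat) (h : a * b ∣ X) : (k % X) / a % b = k / a % b := by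
  conv_lhs => rw [← Nat.mod_mul_right_div_self (k % X) a b]
  rw [Nat.mod_mod_of_dvd _ h, Nat.mod_mul_right_div_self]

-- r / n % c = r / n when r < c * n
lemma div_mod_self_of_lt (r n c : Nat) (hr : r < c * n) : r / n % c = r / n := by
  have h0 : 0 < n := by
    rcases Nat.eq_zero_or_pos n with h | h
    · subst h; omega
    · exact h
  exact Nat.mod_eq_of_lt ((Nat.div_lt_iff_lt_mul h0).mpr hr)

-- the innermost two loops, flattened
lemma dec1 {α : Type} (a b : Nat) (h : Nat → Nat → α) :
    (List.range (b * a)).map (fun s => h (s / a % b) (s % a))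
      = (List.range b).flatMap (fun y => (List.range a).map (fun x => h y x)) := by
  rw [← range_mul_map b a (fun y x => h y x)]
  apply List.map_congr_left
  intro s hs
  have hsb : s < b * a := List.mem_range.mp hs
  rw [div_mod_self_of_lt s a b hsb]

-- three loops, flattened one level
lemma dec2 {α : Type} (a b c : Nat) (h : Nat → Nat → Nat → α) :
    (List.range (c * (b * a))).map (fun r => h (r / (a * b) % c) (r / a % b) (r % a))
      = (List.range c).flatMap (fun tx => (List.range (b * a)).map (fun s => h tx (s / a % b) (s % a))) := by
  rw [← range_mul_map c (b * a) (fun tx s => h tx (s / a % b) (s % a))]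
  apply List.map_congr_left
  intro r hr
  have hrb : r < c * (b * a) := List.mem_range.mp hr
  have e1 : r / (a * b) % c = r / (b * a) := by
    rw [Nat.mul_comm a b]; exact div_mod_self_of_lt r (b * a) c hrb
  have e2 : (r % (b * a)) / a % b = r / a % b := div_mod_of_mod r (b * a) a b ⟨1, by ring⟩
  have e3 : (r % (b * a)) % a = r % a := Nat.mod_mod_of_dvd r ⟨b, by ring⟩
  rw [e1, ← e2, ← e3]

-- four loops, flattened one level
lemma dec3 {α : Type} (a b c d : Nat) (h : Nat → Nat → Nat → Nat → α) :
    (List.range (d * (c * (b * a)))).map (fun k => h (k / (a * b * c)) (k / (a * b) % c) (k / a % b) (k % a))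
      = (List.range d).flatMap (fun ty =>
          (List.range (c * (b * a))).map (fun r => h ty (r / (a * b) % c) (r / a % b) (r % a))) := by
  rw [← range_mul_map d (c * (b * a)) (fun ty r => h ty (r / (a * b) % c) (r / a % b) (r % a))]
  apply List.map_congr_left
  intro k hk
  have e0 : k / (a * b * c) = k / (c * (b * a)) := by rw [show a * b * c = c * (b * a) from by ring]
  have e1 : (k % (c * (b * a))) / (a * b) % c = k / (a * b) % c :=
    div_mod_of_mod k (c * (b * a)) (a * b) c ⟨1, by ring⟩
  have e2 : (k % (c * (b * a))) / a % b = k / a % b :=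
    div_mod_of_mod k (c * (b * a)) a b ⟨c, by ring⟩
  have e3 : (k % (c * (b * a))) % a = k % a := Nat.mod_mod_of_dvd k ⟨c * b, by ring⟩
  rw [e0, ← e1, ← e2, ← e3]

-- the four nested loops are one flat loop over range (d*(c*(b*a))) with divmod-decoded coordinates
lemma nested_eq_flat {σ : Type} (a b c d : Nat) (F : σ → Nat → Nat → Nat → Nat → σ) (s : σ) :
    (List.range d).foldl (fun s ty =>
      (List.range c).foldl (fun s tx =>
        (List.range b).foldl (fun s y =>
          (List.range a).foldl (fun s x => F s ty tx y x) s) s) s) s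
    = (List.range (d * (c * (b * a)))).foldl
        (fun s k => F s (k / (a * b * c)) (k / (a * b) % c) (k / a % b) (k % a)) s := by
  have hmap : (List.range (d * (c * (b * a)))).map
        (fun k => ((k / (a * b * c)), (k / (a * b) % c), (k / a % b), (k % a)))
      = (List.range d).flatMap (fun ty => (List.range c).flatMap (fun tx =>
          (List.range b).flatMap (fun y => (List.range a).map (fun x => (ty, tx, y, x))))) := by
    rw [dec3 a b c d (fun ty tx y x => (ty, tx, y, x))]
    apply List.flatMap_congr
    intro ty _
    rw [dec2 a b c (fun tx y x => (ty, tx, y, x))]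
    apply List.flatMap_congr
    intro tx _
    rw [dec1 a b (fun y x => (ty, tx, y, x))]
  have := congrArg (fun l => l.foldl (fun (s : σ) (q : Nat × Nat × Nat × Nat) => F s q.1 q.2.1 q.2.2.1 q.2.2.2) s) hmap
  simp only [List.foldl_map, List.foldl_flatMap] at this
  exact this.symm

-- the running counter i equals the flat loop index
lemma foldl_counter_range (palette : List (Int × Int × Int × Int)) (dst : Nat → Int) :
    ∀ (N m : Nat) (s : List (Int × Int × Int × Int)),
      ((List.range' m N).foldl
          (fun st k => (st.1 + 1,
            PySem.List.pySetD st.2 (dst k) ((PySem.List.pyGet? palette st.1).getD (0, 0, 0, 0))))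
          ((m : Int), s)).2
        = (List.range' m N).foldl
            (fun t k => PySem.List.pySetD t (dst k) ((PySem.List.pyGet? palette (k : Int)).getD (0, 0, 0, 0))) s := by
  intro N
  induction N with
  | zero => intro m s; simp
  | succ N ih =>
    intro m s
    rw [List.range'_succ, List.foldl_cons, List.foldl_cons]
    have hc : ((m : Int) + 1) = ((m + 1 : Nat) : Int) := by push_cast; ring
    simp only [hc]
    exact ih (m + 1) _

-- the counter starts at 0: specialisation of foldl_counter_range to range N
lemma counter0 (palette : List (Int × Int × Int × Int)) (dst : Nat → Int) (N : Nat)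
    (s : List (Int × Int × Int × Int)) :
    ((List.range N).foldl
        (fun st k => (st.1 + 1,
          PySem.List.pySetD st.2 (dst k) ((PySem.List.pyGet? palette st.1).getD (0, 0, 0, 0))))
        ((0 : Int), s)).2
      = (List.range N).foldl
          (fun t k => PySem.List.pySetD t (dst k) ((PySem.List.pyGet? palette (k : Int)).getD (0, 0, 0, 0))) s := by
  rw [List.range_eq_range']
  have h := foldl_counter_range palette dst N 0 s
  simpa using h

-- the positive case: both programs perform the same sequence of assignments
lemma pos_case (palette : List (Int × Int × Int × Int)) (a b : Nat) (ha : 0 < a) (hb : 0 < b) :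
    tile_palette palette (a : Int) (b : Int) = tile_palette_alt palette (a : Int) (b : Int) := by
  have hcond : (0 : Int) < (a : Int) ∧ (0 : Int) < (b : Int) := ⟨by exact_mod_cast ha, by exact_mod_cast hb⟩
  have h16 : (16 : Int) = ((16 : Nat) : Int) := by norm_num
  simp only [tile_palette, tile_palette_alt, initA_eq]
  rw [if_pos hcond, h16]
  simp only [PySem.Int.floordiv_natCast]
  simp only [← Nat.cast_mul]
  simp only [PySem.List.pyRange_zero_natCast, List.foldl_map]
  simp only [PySem.Int.mod_natCast, PySem.Int.floordiv_natCast]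
  rw [nested_eq_flat]
  rw [counter0 palette]
  rw [show ((16 : Nat) / a) * (16 / b) * (a * b) = (16 / b) * ((16 / a) * (b * a)) from by ring]

theorem tile_palette_spec : Claim_equal_tile_palette := by
  intro palette tx ty _ hpre
  obtain ⟨hx0, hy0, -⟩ := hpre
  unfold Spec_tile_palette
  rcases lt_trichotomy tx 0 with hx | hx | hx
  · -- tile_x < 0 : ntx < 0, the tx-loop is empty on the A side; guard false on the B side
    have hntx : PySem.List.pyRange 0 (PySem.Int.floordiv 16 tx) 1 = [] :=
      pyRange_nonpos (le_of_lt (floordiv16_neg hx))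
    have hcond : ¬ (0 < tx ∧ 0 < ty) := by omega
    simp only [tile_palette, tile_palette_alt, hntx, if_neg hcond, List.foldl_nil,
      List.foldl_fixed, initA_eq]
  · exact absurd hx hx0
  · rcases lt_trichotomy ty 0 with hy | hy | hy
    · -- tile_y < 0 : nty < 0, the outer loop is empty on the A side; guard false on the B side
      have hnty : PySem.List.pyRange 0 (PySem.Int.floordiv 16 ty) 1 = [] :=
        pyRange_nonpos (le_of_lt (floordiv16_neg hy))
      have hcond : ¬ (0 < tx ∧ 0 < ty) := by omega
      simp only [tile_palette, tile_palette_alt, hnty, if_neg hcond, List.foldl_nil, initA_eq]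
    · exact absurd hy hy0
    · obtain ⟨a, rfl⟩ : ∃ a : Nat, tx = (a : Int) := ⟨tx.toNat, (Int.toNat_of_nonneg hx.le).symm⟩
      obtain ⟨b, rfl⟩ : ∃ b : Nat, ty = (b : Int) := ⟨ty.toNat, (Int.toNat_of_nonneg hy.le).symm⟩
      exact pos_case palette a b (by exact_mod_cast hx) (by exact_mod_cast hy)
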